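-- pv_equiv track=rewrite | github.com/NI3J/sadguru-seva-platform | fixed_full_insert.py | extract_field_content
-- ===== SOURCE A (Python) =====
-- def extract_field_content(text, field_name, next_field_names=None):
--     """Extract complete content for a specific field"""
--     start_marker = f"{field_name}:"
--     start_pos = text.find(start_marker)
--
--     if start_pos == -1:
--         return ""
--
--     # Start after the field marker
--     content_start = start_pos + len(start_marker)
--
--     # Find the end - look for next field or end of text
--     end_pos = len(text)
--
--     if next_field_names:
--         for next_field in next_field_names:
--             next_marker = f"\n{next_field}:"
--             found_pos = text.find(next_marker, content_start)
--             if found_pos != -1 and found_pos < end_pos: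
--                 end_pos = found_pos
--
--     # Extract and clean content
--     content = text[content_start:end_pos].strip()
--
--     # Clean up content - remove extra whitespace but preserve paragraphs
--     lines = content.split('\n')
--     cleaned_lines = []
--     for line in lines:
--         line = line.strip()
--         if line:
--             cleaned_lines.append(line)
--         elif cleaned_lines and cleaned_lines[-1]:  # Preserve paragraph breaks
--             cleaned_lines.append('')
--
--     # Remove trailing empty lines
--     while cleaned_lines and not cleaned_lines[-1]:
--         cleaned_lines.pop()
--
--     return '\n'.join(cleaned_lines)
-- ===== SOURCE B (Python) =====
-- def extract_field_content(text, field_name, next_field_names=None):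
--     """Extract complete content for a specific field"""
--     marker = field_name + ":"
--     start = text.find(marker)
--     if start == -1:
--         return ""
--     content_start = start + len(marker)
--     # end of the field = smallest position of any next-field marker, else end of text
--     candidates = [p for p in (text.find("\n" + nf + ":", content_start)
--                               for nf in (next_field_names or [])) if p != -1]
--     end_pos = min(candidates + [len(text)])
--     # paragraph-oriented cleaning: split the stripped lines on blank lines,
--     # keep the non-empty chunks as paragraphs, join paragraphs with a blank line
--     stripped = [l.strip() for l in text[content_start:end_pos].strip().split("\n")]
--     chunks, cur = [], []
--     for l in stripped:
--         if l:
--             cur.append(l)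
--         else:
--             chunks.append(cur)
--             cur = []
--     chunks.append(cur)
--     return "\n\n".join("\n".join(c) for c in chunks if c)
-- ===== Notes on version B (the rewrite author's own statement) =====
-- stated objective: alternative
-- what changed: B computes end_pos as the min of a comprehension of found marker positions instead of A's running-minimum loop, and replaces A's stateful look-back (cleaned_lines[-1]) plus trailing-pop cleaning by splitting the stripped lines into paragraph chunks at blank lines and joining the non-empty chunks with '\n\n'.
import Mathlib
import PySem

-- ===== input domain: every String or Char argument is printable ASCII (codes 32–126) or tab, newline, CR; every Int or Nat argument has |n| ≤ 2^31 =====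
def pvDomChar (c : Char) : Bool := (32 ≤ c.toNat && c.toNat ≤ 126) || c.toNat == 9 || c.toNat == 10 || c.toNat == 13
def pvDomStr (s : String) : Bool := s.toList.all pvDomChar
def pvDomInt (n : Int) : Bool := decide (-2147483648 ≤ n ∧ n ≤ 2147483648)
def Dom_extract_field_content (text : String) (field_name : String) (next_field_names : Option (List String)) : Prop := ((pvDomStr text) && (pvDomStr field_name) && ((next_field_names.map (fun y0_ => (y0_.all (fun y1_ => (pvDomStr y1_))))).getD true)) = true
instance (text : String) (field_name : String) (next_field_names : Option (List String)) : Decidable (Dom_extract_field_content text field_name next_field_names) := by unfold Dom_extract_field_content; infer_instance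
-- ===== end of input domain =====

-- B replaces A's running-minimum loop for end_pos by a comprehension + min, and A's
-- stateful look-back/pop cleaning by a split-into-paragraphs pass; objective: alternative.

-- ===== PORT A =====
-- A-side helper: the 'while cleaned_lines and not cleaned_lines[-1]: cleaned_lines.pop()' loop
def pvPopTrailing (xs : List (List Char)) : List (List Char) :=
  if h : xs.getLast? = some [] then
    pvPopTrailing xs.dropLast
  else xs
termination_by xs.length
decreasing_by
  have hne : xs ≠ [] := by intro hnil; rw [hnil] at h; simp at h
  have := List.length_pos_iff.mpr hne
  simp [List.length_dropLast]; omega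

def extract_field_content (text : String) (field_name : String) (next_field_names : Option (List String)) : String :=
  let t := text.toList
  let start_marker := field_name.toList ++ [':']
  let start_pos := PySem.Chars.find t start_marker
  if start_pos = -1 then "" else
    let content_start : Int := start_pos + (start_marker.length : Int)
    let end_pos0 : Int := (t.length : Int)
    let end_pos : Int :=
      match next_field_names with
      | none => end_pos0
      | some nfs =>
        if nfs = [] then end_pos0
        else nfs.foldl (fun ep nf =>
          let found := PySem.Chars.findFrom t ('\n' :: (nf.toList ++ [':'])) content_start none
          if found ≠ -1 ∧ found < ep then found else ep) end_pos0
    let content := PySem.Chars.strip (PySem.Chars.slice t (some content_start) (some end_pos))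
    let lines := PySem.Chars.splitOn content ['\n']
    let cleaned := lines.foldl (fun acc line =>
        let l := PySem.Chars.strip line
        if l ≠ [] then acc ++ [l]
        else if acc ≠ [] ∧ acc.getLast? ≠ some [] then acc ++ [[]]
        else acc) []
    String.ofList (PySem.Chars.join ['\n'] (pvPopTrailing cleaned))

-- ===== PORT B =====
def extract_field_content_alt (text : String) (field_name : String) (next_field_names : Option (List String)) : String :=
  let t := text.toList
  let marker := field_name.toList ++ [':']
  let start := PySem.Chars.find t marker
  if start = -1 then "" else
    let content_start : Int := start + (marker.length : Int)
    let candidates := (next_field_names.getD []).filterMap (fun nf =>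
        let p := PySem.Chars.findFrom t ('\n' :: (nf.toList ++ [':'])) content_start none
        if p ≠ -1 then some p else none)
    let end_pos : Int := ((PySem.List.min? (candidates ++ [(t.length : Int)]) (fun x => x)).getD 0)
    let stripped := (PySem.Chars.splitOn
        (PySem.Chars.strip (PySem.Chars.slice t (some content_start) (some end_pos)))
        ['\n']).map PySem.Chars.strip
    let st := stripped.foldl (fun (st : List (List (List Char)) × List (List Char)) l =>
        if l ≠ [] then (st.1, st.2 ++ [l]) else (st.1 ++ [st.2], [])) ([], [])
    let chunks := st.1 ++ [st.2]
    String.ofList (PySem.Chars.join ['\n', '\n']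
      ((chunks.filter (fun c => !c.isEmpty)).map (PySem.Chars.join ['\n'])))

-- ===== PRECONDITION & SPEC =====
def Spec_extract_field_content (text : String) (field_name : String) (next_field_names : Option (List String)) (out : String) : Prop := out = extract_field_content_alt text field_name next_field_names
instance (text : String) (field_name : String) (next_field_names : Option (List String)) (out : String) : Decidable (Spec_extract_field_content text field_name next_field_names out) := by unfold Spec_extract_field_content; infer_instance

-- ===== CLAIM (what is proved, stated in full; the proofs are below) =====
def Claim_equal_extract_field_content : Prop := ∀ (text : String) (field_name : String) (next_field_names : Option (List String)), Dom_extract_field_content text field_name next_field_names → Spec_extract_field_content text field_name next_field_names (extract_field_content text field_name next_field_names)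

-- ===== LEMMAS AND PROOFS =====

-- ---- proof-side vocabulary ----
def pvStepA (acc : List (List Char)) (l : List Char) : List (List Char) :=
  if l ≠ [] then acc ++ [l]
  else if acc ≠ [] ∧ acc.getLast? ≠ some [] then acc ++ [[]]
  else acc

def pvHot (acc : List (List Char)) : Bool := decide (acc ≠ [] ∧ acc.getLast? ≠ some [])

def pvEmit : Bool → List (List Char) → List (List Char)
  | _, [] => []
  | b, c :: cs => if c = [] then (if b then [[]] else []) ++ pvEmit false cs else c :: pvEmit true cs

def pvChunks (cs : List (List Char)) : List (List (List Char)) :=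
  (List.splitOnP (fun l => l.isEmpty) cs).filter (fun g => !g.isEmpty)

-- ---- end_pos: running-minimum loop = min of candidates ----
lemma pv_foldl_min_pull (l : List Int) (a b : Int) :
    l.foldl min (min a b) = min a (l.foldl min b) := by
  induction l generalizing b with
  | nil => rfl
  | cons c l ih => simp only [List.foldl_cons, min_assoc, ih]

lemma pv_endpos_eq (cand : List Int) (L : Int) :
    ((PySem.List.min? (cand ++ [L]) (fun x => x)).getD 0) = cand.foldl min L := by
  cases cand with
  | nil => simp [PySem.List.min?_id_cons]
  | cons c cs =>
    rw [List.cons_append, PySem.List.min?_id_cons]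
    simp only [Option.getD_some, List.foldl_cons, List.foldl_append, List.foldl_nil]
    rw [pv_foldl_min_pull]
    exact min_comm _ _

-- ---- A's cleaning loop = pvEmit ----
lemma pv_foldl_stepA (cs : List (List Char)) (acc : List (List Char)) :
    cs.foldl pvStepA acc = acc ++ pvEmit (pvHot acc) cs := by
  induction cs generalizing acc with
  | nil => simp [pvEmit]
  | cons c cs ih =>
    by_cases hc : c = []
    · subst hc
      by_cases hh : acc ≠ [] ∧ acc.getLast? ≠ some []
      · have hstep : pvStepA acc [] = acc ++ [[]] := by simp [pvStepA, hh]
        have hhot : pvHot (acc ++ [[]]) = false := by simp [pvHot]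
        simp only [List.foldl_cons, hstep, ih, hhot]
        have : pvHot acc = true := by simp [pvHot, hh.1, hh.2]
        simp [pvEmit, this]
      · have hstep : pvStepA acc [] = acc := by simp [pvStepA, hh]
        have : pvHot acc = false := by simp [pvHot]; tauto
        simp only [List.foldl_cons, hstep, ih, this]
        simp [pvEmit]
    · have hstep : pvStepA acc c = acc ++ [c] := by simp [pvStepA, hc]
      have hhot : pvHot (acc ++ [c]) = true := by simp [pvHot, hc]
      simp only [List.foldl_cons, hstep, ih, hhot]
      simp [pvEmit, hc]

-- ---- pvPopTrailing characterisation ----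
lemma pv_popTrailing_eq (xs : List (List Char)) :
    pvPopTrailing xs = (xs.reverse.dropWhile (fun l => l.isEmpty)).reverse := by
  induction xs using List.reverseRecOn with
  | nil => simp [pvPopTrailing]
  | append_singleton ys y ih =>
    rw [pvPopTrailing]
    by_cases hy : y = ([] : List Char)
    · subst hy
      simp [ih, List.dropWhile_cons]
    · have h1 : (ys ++ [y]).getLast? = some y := by simp
      have h2 : ¬ ((ys ++ [y]).getLast? = some ([] : List Char)) := by simp [h1, hy]
      simp only [h2, if_neg, dite_eq_ite, if_false]
      have : y.isEmpty = false := by simpa [List.isEmpty_iff] using hy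
      simp [this]


-- ---- run / popTrailing / intercalate helper lemmas ----
lemma pv_emit_run (r y : List (List Char)) (hr : ∀ x ∈ r, x ≠ []) :
    pvEmit true (r ++ y) = r ++ pvEmit true y := by
  induction r with
  | nil => rfl
  | cons x r ih =>
    have hx : x ≠ [] := hr x (by simp)
    simp only [List.cons_append, pvEmit, if_neg hx]
    rw [ih (fun z hz => hr z (by simp [hz]))]

lemma pv_split_run (r y : List (List Char)) (hr : ∀ x ∈ r, x ≠ []) :
    List.splitOnP (fun l => l.isEmpty) (r ++ y)
      = (List.splitOnP (fun l => l.isEmpty) y).modifyHead (r ++ ·) := by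
  induction r with
  | nil =>
    simp only [List.nil_append]
    exact (congrFun List.modifyHead_id _).symm
  | cons x r ih =>
    have hx : x.isEmpty = false := by simpa [List.isEmpty_iff] using hr x (by simp)
    rw [List.cons_append, List.splitOnP_cons]
    simp only [hx, Bool.false_eq_true, if_false]
    rw [ih (fun z hz => hr z (by simp [hz])), List.modifyHead_modifyHead]
    congr 1

lemma pv_pt_append_keep (a x : List (List Char)) (h : pvPopTrailing x ≠ []) :
    pvPopTrailing (a ++ x) = a ++ pvPopTrailing x := by
  rw [pv_popTrailing_eq] at h ⊢
  rw [pv_popTrailing_eq]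
  have hne : (x.reverse.dropWhile (fun l => l.isEmpty)).isEmpty = false := by
    simp only [List.isEmpty_eq_false_iff]
    intro hcon; rw [hcon] at h; simp at h
  rw [List.reverse_append, List.dropWhile_append, hne]
  simp

lemma pv_pt_append_blank (a x : List (List Char)) (h : ∀ e ∈ x, e.isEmpty = true) :
    pvPopTrailing (a ++ x) = pvPopTrailing a := by
  rw [pv_popTrailing_eq, pv_popTrailing_eq]
  have hx : x.reverse.dropWhile (fun l => l.isEmpty) = [] := by
    rw [List.dropWhile_eq_nil_iff]
    intro e he; exact h e (List.mem_reverse.mp he)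
  rw [List.reverse_append, List.dropWhile_append, hx]
  simp

lemma pv_pt_empty_all (x : List (List Char)) (h : pvPopTrailing x = []) :
    ∀ e ∈ x, e.isEmpty = true := by
  rw [pv_popTrailing_eq] at h
  have : x.reverse.dropWhile (fun l => l.isEmpty) = [] := by
    have := congrArg List.reverse h; simpa using this
  rw [List.dropWhile_eq_nil_iff] at this
  intro e he; exact this e (List.mem_reverse.mpr he)

lemma pv_pt_last (xs : List (List Char)) (l : List Char) (h : xs.getLast? = some l)
    (hl : l ≠ []) : pvPopTrailing xs = xs := by
  rw [pv_popTrailing_eq]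
  have hrev : xs.reverse.head? = some l := by rw [List.head?_reverse, h]
  obtain ⟨t, ht⟩ : ∃ t, xs.reverse = l :: t := by
    cases hx : xs.reverse with
    | nil => rw [hx] at hrev; simp at hrev
    | cons a t => rw [hx] at hrev; simp at hrev; exact ⟨t, by rw [hrev]⟩
  rw [ht, List.dropWhile_cons]
  have : l.isEmpty = false := by simpa [List.isEmpty_iff] using hl
  simp only [this, Bool.false_eq_true, if_false]
  rw [← ht, List.reverse_reverse]

lemma pv_intercalate_cons (a : List (List Char)) (G : List (List (List Char))) (hG : G ≠ []) :
    List.intercalate [([] : List Char)] (a :: G)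
      = a ++ [[]] ++ List.intercalate [[]] G := by
  cases G with
  | nil => exact absurd rfl hG
  | cons g G' => simp [List.intercalate]

lemma pv_intercalate_ne_nil (g : List (List Char)) (G : List (List (List Char)))
    (hg : g ≠ []) : List.intercalate [([] : List Char)] (g :: G) ≠ [] := by
  cases G with
  | nil => simpa [List.intercalate] using hg
  | cons g2 G' =>
    rw [pv_intercalate_cons g (g2 :: G') (by simp)]
    intro hcon
    exact hg (List.append_eq_nil_iff.mp (List.append_eq_nil_iff.mp hcon).1).1

-- ---- the main cleaning equivalence ----
lemma pv_main (cs : List (List Char)) :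
    pvPopTrailing (pvEmit false cs) = List.intercalate [[]] (pvChunks cs) := by
  generalize hn : cs.length = n
  induction n using Nat.strong_induction_on generalizing cs with
  | _ n ih =>
  cases cs with
  | nil =>
    simp [pvEmit, pvPopTrailing, pvChunks, List.splitOnP_nil, List.intercalate]
  | cons c cs' =>
    by_cases hc : c = []
    · subst hc
      have h1 : pvEmit false ([] :: cs') = pvEmit false cs' := by simp [pvEmit]
      have h2 : pvChunks ([] :: cs') = pvChunks cs' := by
        simp [pvChunks, List.splitOnP_cons]
      rw [h1, h2]
      exact ih cs'.length (by simp at hn; omega) cs' rfl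
    · have hcB : c.isEmpty = false := by simpa [List.isEmpty_iff] using hc
      have hsplit : cs'.takeWhile (fun l => !l.isEmpty) ++ cs'.dropWhile (fun l => !l.isEmpty) = cs' :=
        List.takeWhile_append_dropWhile
      set r := cs'.takeWhile (fun l => !l.isEmpty) with hr_def
      set rest := cs'.dropWhile (fun l => !l.isEmpty) with hrest_def
      have hr : ∀ x ∈ r, x ≠ [] := by
        intro x hx
        have := List.mem_takeWhile_imp hx
        simpa [List.isEmpty_iff] using this
      have hcr : ∀ x ∈ c :: r, x ≠ [] := by
        intro x hx; rcases List.mem_cons.mp hx with h | h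
        · rw [h]; exact hc
        · exact hr x h
      have hL : pvEmit false (c :: cs') = (c :: r) ++ pvEmit true rest := by
        have : pvEmit false (c :: cs') = c :: pvEmit true cs' := by
          simp [pvEmit, hc]
        rw [this, ← hsplit, pv_emit_run r rest hr]
        simp
      have hS : List.splitOnP (fun l => l.isEmpty) (c :: cs')
          = (List.splitOnP (fun l => l.isEmpty) rest).modifyHead ((c :: r) ++ ·) := by
        rw [List.splitOnP_cons]
        simp only [hcB, Bool.false_eq_true, if_false]
        conv_lhs => rw [← hsplit]
        rw [pv_split_run r (cs'.dropWhile (fun l => !l.isEmpty)) hr, List.modifyHead_modifyHead]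
        rfl
      cases hrest : rest with
      | nil =>
        have hE : pvEmit true rest = [] := by rw [hrest]; rfl
        have hCh : pvChunks (c :: cs') = [c :: r] := by
          rw [pvChunks, hS, hrest, List.splitOnP_nil]
          simp
        rw [hL, hE, List.append_nil, hCh]
        have hlast : (c :: r).getLast? = some ((c :: r).getLast (by simp)) :=
          List.getLast?_eq_some_getLast (by simp)
        rw [pv_pt_last (c :: r) _ hlast (hcr _ (List.getLast_mem _))]
        simp [List.intercalate]
      | cons d rest' =>
        have hd : d = [] := by
          have hh := List.head?_dropWhile_not (fun l => !l.isEmpty) cs'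
          rw [← hrest_def, hrest] at hh
          simpa [List.isEmpty_iff] using hh
        subst hd
        have hE : pvEmit true rest = [[]] ++ pvEmit false rest' := by
          rw [hrest]; simp [pvEmit]
        have hCh : pvChunks (c :: cs') = (c :: r) :: pvChunks rest' := by
          rw [pvChunks, hS, hrest, List.splitOnP_cons]
          simp only [List.isEmpty_nil, if_true, List.modifyHead_cons, List.append_nil]
          rw [List.filter_cons]
          simp only [pvChunks]
          simp [List.isEmpty_iff]
        have hlen : rest'.length < n := by
          have h1 : r.length + rest.length = cs'.length := by
            rw [hr_def, hrest_def, ← List.length_append, hsplit]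
          have h2 : rest.length = rest'.length + 1 := by rw [hrest]; simp
          simp at hn; omega
        have ihm := ih rest'.length hlen rest' rfl
        rw [hL, hE, hCh]
        by_cases hG : pvChunks rest' = []
        · have hI0 : pvPopTrailing (pvEmit false rest') = [] := by
            rw [ihm, hG]; simp [List.intercalate]
          have hblank : ∀ e ∈ ([[]] ++ pvEmit false rest' : List (List Char)), e.isEmpty = true := by
            intro e he
            rcases List.mem_append.mp he with h | h
            · simp at h; simp [h]
            · exact pv_pt_empty_all _ hI0 e h
          rw [pv_pt_append_blank (c :: r) _ hblank]
          have hlast : (c :: r).getLast? = some ((c :: r).getLast (by simp)) :=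
            List.getLast?_eq_some_getLast (by simp)
          rw [pv_pt_last (c :: r) _ hlast (hcr _ (List.getLast_mem _)), hG]
          simp [List.intercalate]
        · obtain ⟨g, G', hGG⟩ : ∃ g G', pvChunks rest' = g :: G' := by
            cases hx : pvChunks rest' with
            | nil => exact absurd hx hG
            | cons g G' => exact ⟨g, G', rfl⟩
          have hgne : g ≠ [] := by
            have hm : g ∈ pvChunks rest' := by rw [hGG]; simp
            have := List.of_mem_filter hm
            simpa [List.isEmpty_iff] using this
          have hIne : pvPopTrailing (pvEmit false rest') ≠ [] := by
            rw [ihm, hGG]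
            exact pv_intercalate_ne_nil g G' hgne
          have hstep1 : pvPopTrailing (([[]] : List (List Char)) ++ pvEmit false rest')
              = [[]] ++ pvPopTrailing (pvEmit false rest') :=
            pv_pt_append_keep _ _ hIne
          have hstep2 : pvPopTrailing ((c :: r) ++ ([[]] ++ pvEmit false rest'))
              = (c :: r) ++ ([[]] ++ pvPopTrailing (pvEmit false rest')) := by
            rw [pv_pt_append_keep _ _ (by rw [hstep1]; simp), hstep1]
          rw [hstep2, ihm, pv_intercalate_cons (c :: r) (pvChunks rest') hG]
          simp

-- ---- B's chunk loop = splitOnP ----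
lemma pv_foldl_stepB (cs : List (List Char)) (ch : List (List (List Char))) (cur : List (List Char)) :
    (let st := cs.foldl (fun (st : List (List (List Char)) × List (List Char)) l =>
        if l ≠ [] then (st.1, st.2 ++ [l]) else (st.1 ++ [st.2], [])) (ch, cur);
      st.1 ++ [st.2])
      = ch ++ (List.splitOnP (fun l => l.isEmpty) cs).modifyHead (cur ++ ·) := by
  induction cs generalizing ch cur with
  | nil => simp [List.splitOnP_nil]
  | cons c cs ih =>
    by_cases hc : c = []
    · subst hc
      have hstep : (fun (st : List (List (List Char)) × List (List Char)) l =>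
          if l ≠ [] then (st.1, st.2 ++ [l]) else (st.1 ++ [st.2], ([] : List (List Char))))
          (ch, cur) ([] : List Char) = (ch ++ [cur], []) := by simp
      simp only [List.foldl_cons, hstep]
      rw [ih]
      have hid2 : ∀ (X : List (List (List Char))), List.modifyHead (fun x => x) X = X :=
        fun X => congrFun List.modifyHead_id X
      have hid : ∀ (X : List (List (List Char))),
          List.modifyHead (fun x => ([] : List (List Char)) ++ x) X = X := by
        intro X
        have h0 : (fun x => ([] : List (List Char)) ++ x) = (fun x => x) := by funext x; simp
        rw [h0]; exact hid2 X
      rw [List.splitOnP_cons]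
      simp [hid2]
    · have hne : c ≠ [] := hc
      have hemp : c.isEmpty = false := by simpa [List.isEmpty_iff] using hc
      have hstep : (fun (st : List (List (List Char)) × List (List Char)) l =>
          if l ≠ [] then (st.1, st.2 ++ [l]) else (st.1 ++ [st.2], ([] : List (List Char))))
          (ch, cur) c = (ch, cur ++ [c]) := by simp [hne]
      simp only [List.foldl_cons, hstep, List.splitOnP_cons, hemp, Bool.false_eq_true,
        if_false]
      rw [ih]
      congr 1
      rw [List.modifyHead_modifyHead]
      congr 1
      funext x
      simp

-- ---- join lemmas ----
lemma pv_join_append (a b : List (List Char)) (ha : a ≠ []) (hb : b ≠ []) (sep : List Char) :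
    PySem.Chars.join sep (a ++ b) = PySem.Chars.join sep a ++ sep ++ PySem.Chars.join sep b := by
  induction a with
  | nil => exact absurd rfl ha
  | cons x a ih =>
    cases a with
    | nil =>
      cases b with
      | nil => exact absurd rfl hb
      | cons y b' => simp [PySem.Chars.join_cons_cons, PySem.Chars.join_singleton]
    | cons z a' =>
      have hj1 : PySem.Chars.join sep ((x :: z :: a') ++ b)
          = x ++ sep ++ PySem.Chars.join sep ((z :: a') ++ b) := by
        have h : (x :: z :: a') ++ b = x :: z :: (a' ++ b) := by simp
        rw [h]
        have h2 : (z :: a') ++ b = z :: (a' ++ b) := by simp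
        rw [h2]
        exact PySem.Chars.join_cons_cons sep x z (a' ++ b)
      rw [hj1, ih (by simp), PySem.Chars.join_cons_cons]
      simp [List.append_assoc]

lemma pv_join_intercalate (gs : List (List (List Char))) (h : ∀ g ∈ gs, g ≠ []) :
    PySem.Chars.join ['\n'] (List.intercalate [[]] gs)
      = PySem.Chars.join ['\n', '\n'] (gs.map (PySem.Chars.join ['\n'])) := by
  induction gs with
  | nil => simp [List.intercalate, PySem.Chars.join_nil]
  | cons g gs ih =>
    cases gs with
    | nil => simp [List.intercalate, PySem.Chars.join_singleton]
    | cons g2 gs' =>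
      have hi : List.intercalate [([] : List Char)] (g :: g2 :: gs')
          = g ++ [[]] ++ List.intercalate [[]] (g2 :: gs') := by
        simp [List.intercalate]
      rw [hi]
      have hJ : List.intercalate [([] : List Char)] (g2 :: gs') ≠ [] := by
        have hg2 : g2 ≠ [] := h g2 (by simp)
        have : List.intercalate [([] : List Char)] (g2 :: gs')
            = g2 ++ (List.intersperse [[]] (g2 :: gs')).tail.flatten := by
          cases gs' <;> simp [List.intercalate]
        rw [this]
        intro hcon
        exact hg2 (List.append_eq_nil_iff.mp hcon).1
      have hg : g ≠ [] := h g (by simp)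
      rw [List.append_assoc, pv_join_append g ([[]] ++ List.intercalate [[]] (g2 :: gs')) hg (by simp) ['\n']]
      have hcons : ([([] : List Char)] ++ List.intercalate [[]] (g2 :: gs'))
          = ([] : List Char) :: List.intercalate [[]] (g2 :: gs') := by simp
      rw [hcons]
      obtain ⟨i, I, hI⟩ : ∃ i I, List.intercalate [([] : List Char)] (g2 :: gs') = i :: I := by
        cases hx : List.intercalate [([] : List Char)] (g2 :: gs') with
        | nil => exact absurd hx hJ
        | cons i I => exact ⟨i, I, rfl⟩
      rw [hI, PySem.Chars.join_cons_cons, ← hI, ih (fun x hx => h x (by simp [hx]))]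
      have hR : PySem.Chars.join ['\n','\n'] (List.map (PySem.Chars.join ['\n']) (g :: g2 :: gs'))
          = PySem.Chars.join ['\n'] g ++ ['\n','\n']
            ++ PySem.Chars.join ['\n','\n'] (PySem.Chars.join ['\n'] g2 :: List.map (PySem.Chars.join ['\n']) gs') := by
        rw [List.map_cons, List.map_cons]
        exact PySem.Chars.join_cons_cons _ _ _ _
      rw [hR]
      simp


-- ---- assembly lemmas ----
lemma pv_endfold (t : List Char) (cstart L : Int) (nfs : List String) :
    nfs.foldl (fun ep nf =>
      if PySem.Chars.findFrom t ('\n' :: (nf.toList ++ [':'])) cstart ≠ -1 ∧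
         PySem.Chars.findFrom t ('\n' :: (nf.toList ++ [':'])) cstart < ep
      then PySem.Chars.findFrom t ('\n' :: (nf.toList ++ [':'])) cstart else ep) L
    = (nfs.filterMap (fun x =>
        if PySem.Chars.findFrom t ('\n' :: (x.toList ++ [':'])) cstart ≠ -1
        then some (PySem.Chars.findFrom t ('\n' :: (x.toList ++ [':'])) cstart) else none)).foldl min L := by
  induction nfs generalizing L with
  | nil => rfl
  | cons v vs ih =>
    by_cases hv : PySem.Chars.findFrom t ('\n' :: (v.toList ++ [':'])) cstart = -1
    · simp [hv, ih]
    · have hmin : (if PySem.Chars.findFrom t ('\n' :: (v.toList ++ [':'])) cstart ≠ -1 ∧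
            PySem.Chars.findFrom t ('\n' :: (v.toList ++ [':'])) cstart < L
          then PySem.Chars.findFrom t ('\n' :: (v.toList ++ [':'])) cstart else L)
          = min L (PySem.Chars.findFrom t ('\n' :: (v.toList ++ [':'])) cstart) := by
        split <;> omega
      simp only [List.foldl_cons, List.filterMap_cons, hmin]
      simp [hv, ih]

lemma pv_branch (ls : List (List Char)) :
    PySem.Chars.join ['\n']
      (pvPopTrailing
        (ls.foldl (fun acc line =>
            if PySem.Chars.strip line ≠ [] then acc ++ [PySem.Chars.strip line]
            else if acc ≠ [] ∧ acc.getLast? ≠ some [] then acc ++ [[]] else acc) []))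
    = PySem.Chars.join ['\n', '\n']
        (List.map (PySem.Chars.join ['\n'])
          (List.filter (fun c => !c.isEmpty)
            ((List.foldl (fun st l => if l ≠ [] then (st.1, st.2 ++ [l]) else (st.1 ++ [st.2], []))
                ([], []) (ls.map PySem.Chars.strip)).1 ++
              [(List.foldl (fun st l => if l ≠ [] then (st.1, st.2 ++ [l]) else (st.1 ++ [st.2], []))
                ([], []) (ls.map PySem.Chars.strip)).2]))) := by
  have hA : ls.foldl (fun acc line =>
      if PySem.Chars.strip line ≠ [] then acc ++ [PySem.Chars.strip line]
      else if acc ≠ [] ∧ acc.getLast? ≠ some [] then acc ++ [[]] else acc) []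
      = pvEmit false (ls.map PySem.Chars.strip) := by
    have h2 : ls.foldl (fun acc line =>
        if PySem.Chars.strip line ≠ [] then acc ++ [PySem.Chars.strip line]
        else if acc ≠ [] ∧ acc.getLast? ≠ some [] then acc ++ [[]] else acc) []
        = (ls.map PySem.Chars.strip).foldl pvStepA [] := by
      rw [List.foldl_map]
      rfl
    rw [h2, pv_foldl_stepA]
    simp [pvHot]
  have hB : (List.foldl (fun st l => if l ≠ [] then (st.1, st.2 ++ [l]) else (st.1 ++ [st.2], []))
        ([], []) (ls.map PySem.Chars.strip)).1 ++
      [(List.foldl (fun st l => if l ≠ [] then (st.1, st.2 ++ [l]) else (st.1 ++ [st.2], []))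
        ([], []) (ls.map PySem.Chars.strip)).2]
      = List.splitOnP (fun l => l.isEmpty) (ls.map PySem.Chars.strip) := by
    have h := pv_foldl_stepB (ls.map PySem.Chars.strip) [] []
    simp only [List.nil_append] at h
    rw [h]
    exact congrFun List.modifyHead_id _
  rw [hA, hB, pv_main]
  have hch : List.filter (fun c => !c.isEmpty)
      (List.splitOnP (fun l => l.isEmpty) (ls.map PySem.Chars.strip))
      = pvChunks (ls.map PySem.Chars.strip) := rfl
  rw [hch]
  exact pv_join_intercalate _ (fun g hg => by
    have := List.of_mem_filter hg
    simpa [List.isEmpty_iff] using this)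

-- ===== VERDICT (by name: the statement is the Claim_ definition above) =====
theorem extract_field_content_spec : Claim_equal_extract_field_content := by
  intro text field_name nfns _
  unfold Spec_extract_field_content
  unfold extract_field_content extract_field_content_alt
  by_cases hf : PySem.Chars.find text.toList (field_name.toList ++ [':']) = -1
  · simp only [hf, if_pos]
  · simp only [hf, if_false]
    cases nfns with
    | none =>
      simp only [Option.getD_none, List.filterMap_nil, pv_endpos_eq, List.foldl_nil]
      exact congrArg String.ofList (pv_branch _)
    | some nfs =>
      by_cases hn : nfs = []
      · subst hn
        simp only [Option.getD_some, List.filterMap_nil, pv_endpos_eq, List.foldl_nil]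
        exact congrArg String.ofList (pv_branch _)
      · simp only [Option.getD_some, if_neg hn]
        rw [pv_endpos_eq, ← pv_endfold]
        exact congrArg String.ofList (pv_branch _)
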